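-- pv_equiv track=rewrite | github.com/yassinalamelden/Protein_Folding_Model | methods/GA_Method/genatic_algorithm_method_streamlit.py | fold_protein_3d_full
-- ===== SOURCE A (Python) =====
-- def rotate_yaw_left(d): x, y, z = d; return (-z, y, x)
--
-- def rotate_yaw_right(d): x, y, z = d; return (z, y, -x)
--
-- def rotate_pitch_up(d): x, y, z = d; return (x, -z, y)
--
-- def rotate_pitch_down(d): x, y, z = d; return (x, z, -y)
--
-- def reverse_direction(d): return tuple(-v for v in d)
--
-- def fold_protein_3d_full(seq, moves):
--     pos, coords, occupied = (0, 0, 0), [(0, 0, 0)], {(0, 0, 0)}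
--     direction = (1, 0, 0)
--     for move in moves:
--         if move == 1:
--             direction = rotate_yaw_left(direction)
--         elif move == 2:
--             direction = rotate_yaw_right(direction)
--         elif move == 3:
--             direction = rotate_pitch_up(direction)
--         elif move == 4:
--             direction = rotate_pitch_down(direction)
--         elif move == 5:
--             direction = reverse_direction(direction)
--         dx, dy, dz = direction
--         pos = (pos[0] + dx, pos[1] + dy, pos[2] + dz)
--         if pos in occupied: return None
--         coords.append(pos)
--         occupied.add(pos)
--     return coords
-- ===== SOURCE B (Python) =====
-- # Table-driven finite-state walk: direction is one of 6 axis states advanced by a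
-- # precomputed permutation table; collision is detected globally afterwards by
-- # comparing the walk's length with its set of distinct positions.
--
-- _DIRS = [(1, 0, 0), (-1, 0, 0), (0, 1, 0), (0, -1, 0), (0, 0, 1), (0, 0, -1)]
-- _TURN = {
--     1: [4, 5, 2, 3, 1, 0],
--     2: [5, 4, 2, 3, 0, 1],
--     3: [0, 1, 4, 5, 3, 2],
--     4: [0, 1, 5, 4, 2, 3],
--     5: [1, 0, 3, 2, 5, 4],
-- }
--
-- def fold_protein_3d_full(seq, moves):
--     s = 0
--     x = y = z = 0
--     coords = [(0, 0, 0)]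
--     for m in moves:
--         if m in _TURN:
--             s = _TURN[m][s]
--         dx, dy, dz = _DIRS[s]
--         x += dx; y += dy; z += dz
--         coords.append((x, y, z))
--     return coords if len(set(coords)) == len(coords) else None
-- ===== Notes on version B (the rewrite author's own statement) =====
-- stated objective: alternative
-- what changed: B replaces A's arithmetic rotations and incremental occupied-set early-return with a table-driven finite-state machine over the 6 axis directions (precomputed permutation tables) plus a single global duplicate check on the completed walk; a collision exists iff the full coordinate list has a repeat, so the early return is unnecessary.
import Mathlib
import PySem

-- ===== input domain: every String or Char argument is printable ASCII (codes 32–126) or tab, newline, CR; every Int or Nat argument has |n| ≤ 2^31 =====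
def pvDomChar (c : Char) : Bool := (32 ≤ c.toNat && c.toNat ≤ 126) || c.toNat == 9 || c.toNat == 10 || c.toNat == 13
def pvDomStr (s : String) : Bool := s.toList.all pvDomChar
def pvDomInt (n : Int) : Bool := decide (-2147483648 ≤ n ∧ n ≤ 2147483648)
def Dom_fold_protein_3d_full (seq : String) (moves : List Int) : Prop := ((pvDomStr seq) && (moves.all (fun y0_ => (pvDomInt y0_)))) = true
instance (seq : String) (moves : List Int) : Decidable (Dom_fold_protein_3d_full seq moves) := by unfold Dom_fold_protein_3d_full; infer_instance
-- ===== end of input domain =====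

-- B replaces A's arithmetic rotations + incremental occupied-set early return by a
-- table-driven finite-state machine over the 6 axis directions and one global
-- duplicate check on the finished walk; equivalence of return values proved on all inputs.

-- ===== PORT A =====
def rotate_yaw_left (d : Int × Int × Int) : Int × Int × Int := (-d.2.2, d.2.1, d.1)
def rotate_yaw_right (d : Int × Int × Int) : Int × Int × Int := (d.2.2, d.2.1, -d.1)
def rotate_pitch_up (d : Int × Int × Int) : Int × Int × Int := (d.1, -d.2.2, d.2.1)
def rotate_pitch_down (d : Int × Int × Int) : Int × Int × Int := (d.1, d.2.2, -d.2.1)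
def reverse_direction (d : Int × Int × Int) : Int × Int × Int := (-d.1, -d.2.1, -d.2.2)

def foldLoopA : List Int → (Int × Int × Int) → (Int × Int × Int) → List (Int × Int × Int) → PySem.Set (Int × Int × Int) → Option (List (Int × Int × Int))
  | [], _, _, coords, _ => some coords
  | m :: rest, direction, pos, coords, occupied =>
    let direction' :=
      if m == 1 then rotate_yaw_left direction
      else if m == 2 then rotate_yaw_right direction
      else if m == 3 then rotate_pitch_up direction
      else if m == 4 then rotate_pitch_down direction
      else if m == 5 then reverse_direction direction
      else direction
    let pos' := (pos.1 + direction'.1, pos.2.1 + direction'.2.1, pos.2.2 + direction'.2.2)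
    if PySem.Set.contains occupied pos' then none
    else foldLoopA rest direction' pos' (coords ++ [pos']) (PySem.Set.add occupied pos')

def fold_protein_3d_full (seq : String) (moves : List Int) : Option (List (Int × Int × Int)) :=
  foldLoopA moves (1, 0, 0) (0, 0, 0) [(0, 0, 0)] (PySem.Set.ofList [(0, 0, 0)])

-- ===== PORT B =====
-- _DIRS: the 6 axis directions, indexed by the FSM state 0..5
def dirsTbl : List (Int × Int × Int) := [(1, 0, 0), (-1, 0, 0), (0, 1, 0), (0, -1, 0), (0, 0, 1), (0, 0, -1)]
-- _TURN: per-move permutation of states ('m in _TURN' = isSome)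
def turnTbl (m : Int) : Option (List Nat) :=
  if m == 1 then some [4, 5, 2, 3, 1, 0]
  else if m == 2 then some [5, 4, 2, 3, 0, 1]
  else if m == 3 then some [0, 1, 4, 5, 3, 2]
  else if m == 4 then some [0, 1, 5, 4, 2, 3]
  else if m == 5 then some [1, 0, 3, 2, 5, 4]
  else none

-- Python list indexing t[s] / _DIRS[s]: getD is exact here since s is always < 6 (never raises)
def walkAlt : List Int → Nat → (Int × Int × Int) → List (Int × Int × Int) → List (Int × Int × Int)
  | [], _, _, coords => coords
  | m :: rest, s, p, coords =>
    let s' := match turnTbl m with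
      | some t => t.getD s 0
      | none => s
    let d := dirsTbl.getD s' (0, 0, 0)
    let p' := (p.1 + d.1, p.2.1 + d.2.1, p.2.2 + d.2.2)
    walkAlt rest s' p' (coords ++ [p'])

def fold_protein_3d_full_alt (seq : String) (moves : List Int) : Option (List (Int × Int × Int)) :=
  let coords := walkAlt moves 0 (0, 0, 0) [(0, 0, 0)]
  if (PySem.Set.ofList coords).length == coords.length then some coords else none

-- ===== PRECONDITION & SPEC =====
def Spec_fold_protein_3d_full (seq : String) (moves : List Int) (out : Option (List (Int × Int × Int))) : Prop := out = fold_protein_3d_full_alt seq moves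
instance (seq : String) (moves : List Int) (out : Option (List (Int × Int × Int))) : Decidable (Spec_fold_protein_3d_full seq moves out) := by unfold Spec_fold_protein_3d_full; infer_instance

-- ===== CLAIM (what is proved, stated in full; the proofs are below) =====
def Claim_equal_fold_protein_3d_full : Prop := ∀ (seq : String) (moves : List Int), Dom_fold_protein_3d_full seq moves → Spec_fold_protein_3d_full seq moves (fold_protein_3d_full seq moves)

-- ===== LEMMAS AND PROOFS =====

-- A's step on the direction vector, as a named function
def stepA (direction : Int × Int × Int) (m : Int) : Int × Int × Int :=
  if m == 1 then rotate_yaw_left direction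
  else if m == 2 then rotate_yaw_right direction
  else if m == 3 then rotate_pitch_up direction
  else if m == 4 then rotate_pitch_down direction
  else if m == 5 then reverse_direction direction
  else direction

-- B's step on the state
def stepB (s : Nat) (m : Int) : Nat :=
  match turnTbl m with
  | some t => t.getD s 0
  | none => s

-- the sequence of positions both walks visit after the origin
def pathA : List Int → (Int × Int × Int) → (Int × Int × Int) → List (Int × Int × Int)
  | [], _, _ => []
  | m :: rest, direction, pos =>
    let direction' := stepA direction m
    let pos' := (pos.1 + direction'.1, pos.2.1 + direction'.2.1, pos.2.2 + direction'.2.2)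
    pos' :: pathA rest direction' pos'

lemma stepB_lt (s : Nat) (hs : s < 6) (m : Int) : stepB s m < 6 := by
  unfold stepB turnTbl
  split_ifs <;> simp <;> interval_cases s <;> decide

lemma step_corr (s : Nat) (hs : s < 6) (m : Int) :
    stepA (dirsTbl.getD s (0, 0, 0)) m = dirsTbl.getD (stepB s m) (0, 0, 0) := by
  unfold stepA stepB turnTbl
  split_ifs with h1 h2 h3 h4 h5 <;>
    simp_all [rotate_yaw_left, rotate_yaw_right, rotate_pitch_up, rotate_pitch_down, reverse_direction] <;>
    interval_cases s <;> simp [dirsTbl]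

lemma walkAlt_eq_pathA : ∀ (moves : List Int) (s : Nat), s < 6 → ∀ (pos : Int × Int × Int) (coords : List (Int × Int × Int)),
    walkAlt moves s pos coords = coords ++ pathA moves (dirsTbl.getD s (0, 0, 0)) pos := by
  intro moves
  induction moves with
  | nil => intro s hs pos coords; simp [walkAlt, pathA]
  | cons m rest ih =>
    intro s hs pos coords
    simp only [walkAlt, pathA]
    rw [show (match turnTbl m with | some t => t.getD s 0 | none => s) = stepB s m from rfl]
    rw [ih (stepB s m) (stepB_lt s hs m), step_corr s hs m]
    simp

-- characterization of A's loop: result = full path iff it is duplicate-free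
lemma foldLoopA_char : ∀ (moves : List Int) (direction pos : Int × Int × Int)
    (coords : List (Int × Int × Int)) (occupied : PySem.Set (Int × Int × Int)),
    coords.Nodup →
    (∀ p, PySem.Set.contains occupied p = true ↔ p ∈ coords) →
    foldLoopA moves direction pos coords occupied =
      if (coords ++ pathA moves direction pos).Nodup then some (coords ++ pathA moves direction pos) else none := by
  intro moves
  induction moves with
  | nil => intro direction pos coords occ hnd hocc; simp [foldLoopA, pathA, hnd]
  | cons m rest ih =>
    intro direction pos coords occ hnd hocc
    simp only [foldLoopA, pathA]
    rw [show (if m == 1 then rotate_yaw_left direction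
      else if m == 2 then rotate_yaw_right direction
      else if m == 3 then rotate_pitch_up direction
      else if m == 4 then rotate_pitch_down direction
      else if m == 5 then reverse_direction direction
      else direction) = stepA direction m from rfl]
    set direction' := stepA direction m with hd
    set pos' := (pos.1 + direction'.1, pos.2.1 + direction'.2.1, pos.2.2 + direction'.2.2) with hp
    by_cases hmem : pos' ∈ coords
    · have hc : PySem.Set.contains occ pos' = true := (hocc pos').mpr hmem
      rw [hc]
      have : ¬ (coords ++ pos' :: pathA rest direction' pos').Nodup := by
        intro hnd'
        have := (List.nodup_append.mp hnd').2.2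
        exact this pos' hmem pos' (by simp) rfl
      simp [this]
    · have hc : PySem.Set.contains occ pos' = false := by
        by_contra h
        exact hmem ((hocc pos').mp (by simpa using h))
      rw [hc]
      simp only [Bool.false_eq_true, if_false]
      have hnd2 : (coords ++ [pos']).Nodup := by
        simp only [List.nodup_append, hnd, true_and]
        constructor
        · simp
        · rintro a ha b hb rfl
          simp at hb; exact hmem (hb ▸ ha)
      have hocc2 : ∀ p, PySem.Set.contains (PySem.Set.add occ pos') p = true ↔ p ∈ coords ++ [pos'] := by
        intro p
        rw [PySem.Set.contains_iff, PySem.Set.mem_add, ← PySem.Set.contains_iff, hocc p]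
        simp
      rw [ih direction' pos' (coords ++ [pos']) (PySem.Set.add occ pos') hnd2 hocc2]
      simp
  -- done

-- length of set(xs) equals length of xs iff xs has no duplicates
lemma ofList_sublist {α : Type} [BEq α] [LawfulBEq α] (xs : List α) : (PySem.Set.ofList xs).Sublist xs := by
  induction xs using List.reverseRecOn with
  | nil => simp [PySem.Set.ofList]
  | append_singleton xs x ih =>
    rw [PySem.Set.ofList_append_singleton, PySem.Set.add_eq_ite]
    split_ifs with h
    · exact ih.trans (List.sublist_append_left xs [x])
    · exact List.Sublist.append ih (List.Sublist.refl [x])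

lemma ofList_length_eq_iff {α : Type} [BEq α] [LawfulBEq α] (xs : List α) :
    ((PySem.Set.ofList xs).length = xs.length) ↔ xs.Nodup := by
  constructor
  · intro h
    have := (ofList_sublist xs).eq_of_length h
    rw [← this]
    exact PySem.Set.nodup_ofList xs
  · intro h
    rw [show PySem.Set.ofList xs = xs from PySem.Set.ofList_eq_self_of_nodup xs h]

-- ===== VERDICT (by name: the statement is the Claim_ definition above) =====
theorem fold_protein_3d_full_spec : Claim_equal_fold_protein_3d_full := by
  intro seq moves _
  unfold Spec_fold_protein_3d_full fold_protein_3d_full fold_protein_3d_full_alt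
  rw [walkAlt_eq_pathA moves 0 (by decide) (0, 0, 0) [(0, 0, 0)]]
  rw [foldLoopA_char moves (1, 0, 0) (0, 0, 0) [(0, 0, 0)] _ (by decide)
        (fun p => by rw [PySem.Set.contains_iff, PySem.Set.mem_ofList])]
  have hd : dirsTbl.getD 0 (0, 0, 0) = (1, 0, 0) := rfl
  rw [hd]
  set full := [((0 : Int), (0 : Int), (0 : Int))] ++ pathA moves (1, 0, 0) (0, 0, 0) with hf
  by_cases h : full.Nodup
  · rw [if_pos h, if_pos (beq_iff_eq.mpr ((ofList_length_eq_iff full).mpr h))]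
  · rw [if_neg h, if_neg (fun hc => h ((ofList_length_eq_iff full).mp (beq_iff_eq.mp hc)))]
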